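-- pv_equiv track=rewrite | github.com/TeeJayYang/Prep | misc/RefuelingCars.py | MaxWaitingTime
-- ===== SOURCE A (Python) =====
-- def MaxWaitingTime(A, X, Y, Z):
--     # A is the queue of cars of size within range [1,100000]
--     # each element in A is within range[1, 1 billion]
--     # X,Y,Z are the gas stations with capacity within range [1, 1 billion]
--     dispensers = [X, Y, Z]
--     cars = [0]*3
--     total = 0
--
--     def enterCar(c):
--         candidate = None
--         candidate_car = max(cars)
--         for i in reversed(range(3)):
--             if dispensers[i] >= c and cars[i] <= candidate_car:
--                 candidate = i
--                 candidate_car = cars[i]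
--         if candidate is None:
--             return -1
--         time = cars[candidate]
--         dispensers[candidate] -= c
--         for i in range(3):
--             cars[i] = max(cars[i]-time, 0)
--         cars[candidate] = c
--         return time
--
--     for c in A:
--         time = enterCar(c)
--         if time == -1:
--             return -1
--         else:
--             total += time
--         # print (cars, dispensers, c, time)
--     return total
-- ===== SOURCE B (Python) =====
-- def MaxWaitingTime(A, X, Y, Z):
--     # B maintains absolute dispenser free-times and a clock; the running total of waits
--     # telescopes to the clock itself (start time of the last car), so no sum is kept.
--     cap = [X, Y, Z]
--     free = [0, 0, 0]
--     now = 0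
--     for c in A:
--         eff = [max(f, now) if k >= c else None for k, f in zip(cap, free)]
--         avail = [e for e in eff if e is not None]
--         if not avail:
--             return -1
--         now = min(avail)
--         j = eff.index(now)
--         cap[j] -= c
--         free[j] = now + c
--     return now
-- ===== Notes on version B (the rewrite author's own statement) =====
-- stated objective: alternative
-- what changed: B keeps no running sum of waits at all: it exploits the telescoping identity that the accumulated wait equals the absolute clock (the start time of the last car), so it only maintains absolute free-times and a clock, selects the dispenser by masking ineligible slots with None and taking eff.index(min(avail)) instead of A's reversed candidate scan, never rewrites the three counters per step, and simply returns the final clock; …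
-- outside the precondition, e.g. on MaxWaitingTime([-1, -1], 5, 5, 5): A returns -1, B returns 0
import Mathlib
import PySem

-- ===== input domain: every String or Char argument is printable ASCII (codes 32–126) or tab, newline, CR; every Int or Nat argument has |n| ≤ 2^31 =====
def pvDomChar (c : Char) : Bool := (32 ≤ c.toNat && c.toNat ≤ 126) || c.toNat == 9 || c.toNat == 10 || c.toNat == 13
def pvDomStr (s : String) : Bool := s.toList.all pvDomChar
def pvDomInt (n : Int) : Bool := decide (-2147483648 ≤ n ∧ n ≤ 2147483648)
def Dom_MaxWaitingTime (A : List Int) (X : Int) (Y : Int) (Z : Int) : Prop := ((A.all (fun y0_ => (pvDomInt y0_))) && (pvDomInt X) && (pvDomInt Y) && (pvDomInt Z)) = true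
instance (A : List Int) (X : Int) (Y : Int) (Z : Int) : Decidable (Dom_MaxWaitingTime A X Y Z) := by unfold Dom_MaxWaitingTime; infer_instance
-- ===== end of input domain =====

-- B drops A's running total and relative-countdown counters entirely: total wait telescopes to the
-- absolute clock (the last car's start time), selected via a None-masked list + min + index.

-- ===== PORT A =====
-- loop state: (dispensers[0..2], cars[0..2], total); none = the Python returned -1.
-- enterCar: reversed(range(3)) scan with candidate_car initialised to max(cars) and
-- condition dispensers[i] >= c and cars[i] <= candidate_car; then the clamping rewrite of cars.
def stepA (st : Option (Int × Int × Int × Int × Int × Int × Int)) (c : Int) :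
    Option (Int × Int × Int × Int × Int × Int × Int) :=
  match st with
  | none => none
  | some (d1, d2, d3, r1, r2, r3, tot) =>
    let cc0 : Int := max r1 (max r2 r3)
    -- i = 2
    let p1 : Option Nat × Int := if d3 ≥ c ∧ r3 ≤ cc0 then (some 2, r3) else (none, cc0)
    -- i = 1
    let p2 : Option Nat × Int := if d2 ≥ c ∧ r2 ≤ p1.2 then (some 1, r2) else p1
    -- i = 0
    let p3 : Option Nat × Int := if d1 ≥ c ∧ r1 ≤ p2.2 then (some 0, r1) else p2
    match p3.1 with
    | none => none   -- enterCar returned -1, the whole function returns -1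
    | some i =>
      let time : Int := if i = 0 then r1 else if i = 1 then r2 else r3
      let d1' := if i = 0 then d1 - c else d1
      let d2' := if i = 1 then d2 - c else d2
      let d3' := if i = 2 then d3 - c else d3
      let s1 := max (r1 - time) 0
      let s2 := max (r2 - time) 0
      let s3 := max (r3 - time) 0
      let r1' := if i = 0 then c else s1
      let r2' := if i = 1 then c else s2
      let r3' := if i = 2 then c else s3
      -- the outer loop's 'if time == -1: return -1'
      if time = -1 then none else some (d1', d2', d3', r1', r2', r3', tot + time)

def MaxWaitingTime (A : List Int) (X : Int) (Y : Int) (Z : Int) : Int :=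
  match A.foldl stepA (some (X, Y, Z, 0, 0, 0, 0)) with
  | none => -1
  | some (_, _, _, _, _, _, tot) => tot

-- ===== PORT B =====
-- loop state: (cap[0..2], free[0..2], now); none = the Python returned -1.
-- eff = [max(f,now) if k>=c else None, …]; avail = its non-None values (filterMap id);
-- now = min(avail) (Python min of a nonempty int list = the running-min fold);
-- j = eff.index(now) (PySem.List.index?; the 'none' arm is unreachable since min(avail) ∈ eff).
def stepB (st : Option (Int × Int × Int × Int × Int × Int × Int)) (c : Int) :
    Option (Int × Int × Int × Int × Int × Int × Int) :=
  match st with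
  | none => none
  | some (k1, k2, k3, f1, f2, f3, now) =>
    let eff : List (Option Int) :=
      [if k1 ≥ c then some (max f1 now) else none,
       if k2 ≥ c then some (max f2 now) else none,
       if k3 ≥ c then some (max f3 now) else none]
    match eff.filterMap id with
    | [] => none
    | a :: rest =>
      let t : Int := rest.foldl min a
      match PySem.List.index? eff (some t) with
      | none => none   -- unreachable: t = min(avail) is an element of eff
      | some j =>
        some (if j = 0 then k1 - c else k1,
              if j = 1 then k2 - c else k2,
              if j = 2 then k3 - c else k3,
              if j = 0 then t + c else f1,
              if j = 1 then t + c else f2,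
              if j = 2 then t + c else f3,
              t)

def MaxWaitingTime_alt (A : List Int) (X : Int) (Y : Int) (Z : Int) : Int :=
  match A.foldl stepB (some (X, Y, Z, 0, 0, 0, 0)) with
  | none => -1
  | some (_, _, _, _, _, _, now) => now

-- ===== PRECONDITION & SPEC =====
-- Pre_ restricts to the function's natural domain (A's own comment: car sizes lie in [1, 1e9]):
-- it excludes lists with negative car sizes, where A's -1 sentinel for "no dispenser" collides
-- with genuine negative wait times and its clamped relative counters drift from real timestamps.
def Pre_MaxWaitingTime (A : List Int) (X : Int) (Y : Int) (Z : Int) : Prop :=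
  ∀ c ∈ A, 0 ≤ c

instance (A : List Int) (X : Int) (Y : Int) (Z : Int) : Decidable (Pre_MaxWaitingTime A X Y Z) := by
  unfold Pre_MaxWaitingTime; infer_instance

def pvWitness_MaxWaitingTime : List Int × Int × Int × Int := ([3, 2, 4, 1], 5, 4, 3)

def Spec_MaxWaitingTime (A : List Int) (X : Int) (Y : Int) (Z : Int) (out : Int) : Prop := out = MaxWaitingTime_alt A X Y Z
instance (A : List Int) (X : Int) (Y : Int) (Z : Int) (out : Int) : Decidable (Spec_MaxWaitingTime A X Y Z out) := by unfold Spec_MaxWaitingTime; infer_instance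

-- ===== CLAIM (what is proved, stated in full; the proofs are below) =====
def Claim_equal_MaxWaitingTime : Prop := ∀ (A : List Int) (X : Int) (Y : Int) (Z : Int), Dom_MaxWaitingTime A X Y Z → Pre_MaxWaitingTime A X Y Z → Spec_MaxWaitingTime A X Y Z (MaxWaitingTime A X Y Z)

-- ===== LEMMAS AND PROOFS =====

-- map a B-state to the corresponding A-state: same capacities, each relative counter =
-- clamped absolute free time minus the clock, and A's running total = B's clock (telescoping).
def gBA : (Int×Int×Int×Int×Int×Int×Int) → (Int×Int×Int×Int×Int×Int×Int) :=
  fun (k1,k2,k3,f1,f2,f3,now) => (k1,k2,k3, max f1 now - now, max f2 now - now, max f3 now - now, now)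

lemma stepA_none (c d1 d2 d3 r1 r2 r3 tot : Int)
    (h : ¬ d1 ≥ c ∧ ¬ d2 ≥ c ∧ ¬ d3 ≥ c) :
    stepA (some (d1, d2, d3, r1, r2, r3, tot)) c = none := by
  simp only [stepA]
  split_ifs <;> first | rfl | (exfalso; omega)

lemma stepA_pick0 (c d1 d2 d3 r1 r2 r3 tot : Int) (hr : 0 ≤ r1)
    (h : d1 ≥ c ∧ (d2 < c ∨ r1 ≤ r2) ∧ (d3 < c ∨ r1 ≤ r3)) :
    stepA (some (d1, d2, d3, r1, r2, r3, tot)) c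
      = some (d1 - c, d2, d3, c, max (r2 - r1) 0, max (r3 - r1) 0, tot + r1) := by
  simp only [stepA]
  split_ifs <;> (try simp) <;> omega

lemma stepA_pick1 (c d1 d2 d3 r1 r2 r3 tot : Int) (hr : 0 ≤ r2)
    (h0 : ¬ (d1 ≥ c ∧ (d2 < c ∨ r1 ≤ r2) ∧ (d3 < c ∨ r1 ≤ r3)))
    (h : d2 ≥ c ∧ (d3 < c ∨ r2 ≤ r3)) :
    stepA (some (d1, d2, d3, r1, r2, r3, tot)) c
      = some (d1, d2 - c, d3, max (r1 - r2) 0, c, max (r3 - r2) 0, tot + r2) := by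
  simp only [stepA]
  split_ifs <;> (try simp) <;> omega

lemma stepA_pick2 (c d1 d2 d3 r1 r2 r3 tot : Int) (hr : 0 ≤ r3)
    (h0 : ¬ (d1 ≥ c ∧ (d2 < c ∨ r1 ≤ r2) ∧ (d3 < c ∨ r1 ≤ r3)))
    (h1 : ¬ (d2 ≥ c ∧ (d3 < c ∨ r2 ≤ r3)))
    (h : d3 ≥ c) :
    stepA (some (d1, d2, d3, r1, r2, r3, tot)) c
      = some (d1, d2, d3 - c, max (r1 - r3) 0, max (r2 - r3) 0, c, tot + r3) := by
  simp only [stepA]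
  split_ifs <;> (try simp) <;> omega

lemma stepB_none (c k1 k2 k3 f1 f2 f3 now : Int)
    (h : ¬ k1 ≥ c ∧ ¬ k2 ≥ c ∧ ¬ k3 ≥ c) :
    stepB (some (k1, k2, k3, f1, f2, f3, now)) c = none := by
  simp only [stepB]
  split_ifs <;> first | rfl | (exfalso; omega)

lemma stepB_pick0 (c k1 k2 k3 f1 f2 f3 now : Int)
    (h : k1 ≥ c ∧ (k2 < c ∨ max f1 now ≤ max f2 now) ∧ (k3 < c ∨ max f1 now ≤ max f3 now)) :
    stepB (some (k1, k2, k3, f1, f2, f3, now)) c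
      = some (k1 - c, k2, k3, max f1 now + c, f2, f3, max f1 now) := by
  obtain ⟨h1, h2, h3⟩ := h
  by_cases hk2 : k2 ≥ c <;> by_cases hk3 : k3 ≥ c
  · simp only [stepB, if_pos h1, if_pos hk2, if_pos hk3]
    rw [show List.filterMap id [some (max f1 now), some (max f2 now), some (max f3 now)]
          = [max f1 now, max f2 now, max f3 now] from by simp]
    simp only [List.foldl_cons, List.foldl_nil]
    rw [show min (min (max f1 now) (max f2 now)) (max f3 now) = max f1 now from by omega,
      PySem.List.index?_cons_self]
    rfl
  · simp only [stepB, if_pos h1, if_pos hk2, if_neg hk3]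
    rw [show List.filterMap id [some (max f1 now), some (max f2 now), none]
          = [max f1 now, max f2 now] from by simp]
    simp only [List.foldl_cons, List.foldl_nil]
    rw [show min (max f1 now) (max f2 now) = max f1 now from by omega,
      PySem.List.index?_cons_self]
    rfl
  · simp only [stepB, if_pos h1, if_neg hk2, if_pos hk3]
    rw [show List.filterMap id [some (max f1 now), none, some (max f3 now)]
          = [max f1 now, max f3 now] from by simp]
    simp only [List.foldl_cons, List.foldl_nil]
    rw [show min (max f1 now) (max f3 now) = max f1 now from by omega,
      PySem.List.index?_cons_self]
    rfl
  · simp only [stepB, if_pos h1, if_neg hk2, if_neg hk3]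
    rw [show List.filterMap id [some (max f1 now), none, none]
          = [max f1 now] from by simp]
    simp only [List.foldl_nil]
    rw [PySem.List.index?_cons_self]
    rfl

lemma stepB_pick1 (c k1 k2 k3 f1 f2 f3 now : Int)
    (h0 : ¬ (k1 ≥ c ∧ (k2 < c ∨ max f1 now ≤ max f2 now) ∧ (k3 < c ∨ max f1 now ≤ max f3 now)))
    (h : k2 ≥ c ∧ (k3 < c ∨ max f2 now ≤ max f3 now)) :
    stepB (some (k1, k2, k3, f1, f2, f3, now)) c
      = some (k1, k2 - c, k3, f1, max f2 now + c, f3, max f2 now) := by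
  obtain ⟨h2, h23⟩ := h
  by_cases hk1 : k1 ≥ c <;> by_cases hk3 : k3 ≥ c
  · simp only [stepB, if_pos hk1, if_pos h2, if_pos hk3]
    rw [show List.filterMap id [some (max f1 now), some (max f2 now), some (max f3 now)]
          = [max f1 now, max f2 now, max f3 now] from by simp]
    simp only [List.foldl_cons, List.foldl_nil]
    have hne : (some (max f1 now) : Option Int) ≠ some (max f2 now) := by
      simp only [ne_eq, Option.some.injEq]; omega
    rw [show min (min (max f1 now) (max f2 now)) (max f3 now) = max f2 now from by omega,
      PySem.List.index?_cons_of_ne _ hne, PySem.List.index?_cons_self]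
    rfl
  · simp only [stepB, if_pos hk1, if_pos h2, if_neg hk3]
    rw [show List.filterMap id [some (max f1 now), some (max f2 now), none]
          = [max f1 now, max f2 now] from by simp]
    simp only [List.foldl_cons, List.foldl_nil]
    have hne : (some (max f1 now) : Option Int) ≠ some (max f2 now) := by
      simp only [ne_eq, Option.some.injEq]; omega
    rw [show min (max f1 now) (max f2 now) = max f2 now from by omega,
      PySem.List.index?_cons_of_ne _ hne, PySem.List.index?_cons_self]
    rfl
  · simp only [stepB, if_neg hk1, if_pos h2, if_pos hk3]
    rw [show List.filterMap id [none, some (max f2 now), some (max f3 now)]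
          = [max f2 now, max f3 now] from by simp]
    simp only [List.foldl_cons, List.foldl_nil]
    have hne : (none : Option Int) ≠ some (min (max f2 now) (max f3 now)) := by simp
    rw [show min (max f2 now) (max f3 now) = max f2 now from by omega] at hne ⊢
    rw [PySem.List.index?_cons_of_ne _ hne, PySem.List.index?_cons_self]
    rfl
  · simp only [stepB, if_neg hk1, if_pos h2, if_neg hk3]
    rw [show List.filterMap id [none, some (max f2 now), none]
          = [max f2 now] from by simp]
    simp only [List.foldl_nil]
    have hne : (none : Option Int) ≠ some (max f2 now) := by simp
    rw [PySem.List.index?_cons_of_ne _ hne, PySem.List.index?_cons_self]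
    rfl

lemma stepB_pick2 (c k1 k2 k3 f1 f2 f3 now : Int)
    (h0 : ¬ (k1 ≥ c ∧ (k2 < c ∨ max f1 now ≤ max f2 now) ∧ (k3 < c ∨ max f1 now ≤ max f3 now)))
    (h1 : ¬ (k2 ≥ c ∧ (k3 < c ∨ max f2 now ≤ max f3 now)))
    (h : k3 ≥ c) :
    stepB (some (k1, k2, k3, f1, f2, f3, now)) c
      = some (k1, k2, k3 - c, f1, f2, max f3 now + c, max f3 now) := by
  by_cases hk1 : k1 ≥ c <;> by_cases hk2 : k2 ≥ c
  · simp only [stepB, if_pos hk1, if_pos hk2, if_pos h]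
    rw [show List.filterMap id [some (max f1 now), some (max f2 now), some (max f3 now)]
          = [max f1 now, max f2 now, max f3 now] from by simp]
    simp only [List.foldl_cons, List.foldl_nil]
    have hne1 : (some (max f1 now) : Option Int) ≠ some (max f3 now) := by
      simp only [ne_eq, Option.some.injEq]; omega
    have hne2 : (some (max f2 now) : Option Int) ≠ some (max f3 now) := by
      simp only [ne_eq, Option.some.injEq]; omega
    rw [show min (min (max f1 now) (max f2 now)) (max f3 now) = max f3 now from by omega,
      PySem.List.index?_cons_of_ne _ hne1, PySem.List.index?_cons_of_ne _ hne2,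
      PySem.List.index?_cons_self]
    rfl
  · simp only [stepB, if_pos hk1, if_neg hk2, if_pos h]
    rw [show List.filterMap id [some (max f1 now), none, some (max f3 now)]
          = [max f1 now, max f3 now] from by simp]
    simp only [List.foldl_cons, List.foldl_nil]
    have hne1 : (some (max f1 now) : Option Int) ≠ some (max f3 now) := by
      simp only [ne_eq, Option.some.injEq]; omega
    have hne2 : (none : Option Int) ≠ some (max f3 now) := by simp
    rw [show min (max f1 now) (max f3 now) = max f3 now from by omega,
      PySem.List.index?_cons_of_ne _ hne1, PySem.List.index?_cons_of_ne _ hne2,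
      PySem.List.index?_cons_self]
    rfl
  · simp only [stepB, if_neg hk1, if_pos hk2, if_pos h]
    rw [show List.filterMap id [none, some (max f2 now), some (max f3 now)]
          = [max f2 now, max f3 now] from by simp]
    simp only [List.foldl_cons, List.foldl_nil]
    have hne2 : (some (max f2 now) : Option Int) ≠ some (max f3 now) := by
      simp only [ne_eq, Option.some.injEq]; omega
    rw [show min (max f2 now) (max f3 now) = max f3 now from by omega]
    have hne1 : (none : Option Int) ≠ some (max f3 now) := by simp
    rw [PySem.List.index?_cons_of_ne _ hne1, PySem.List.index?_cons_of_ne _ hne2,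
      PySem.List.index?_cons_self]
    rfl
  · simp only [stepB, if_neg hk1, if_neg hk2, if_pos h]
    rw [show List.filterMap id [none, none, some (max f3 now)]
          = [max f3 now] from by simp]
    simp only [List.foldl_nil]
    have hne : (none : Option Int) ≠ some (max f3 now) := by simp
    rw [PySem.List.index?_cons_of_ne _ hne, PySem.List.index?_cons_of_ne _ hne,
      PySem.List.index?_cons_self]
    rfl

set_option maxHeartbeats 1000000 in
lemma step_eq (c : Int) (hc : 0 ≤ c) (s : Option (Int×Int×Int×Int×Int×Int×Int)) :
    stepA (Option.map gBA s) c = Option.map gBA (stepB s c) := by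
  match s with
  | none => rfl
  | some (k1, k2, k3, f1, f2, f3, now) =>
    simp only [Option.map_some, gBA]
    by_cases h0 : k1 ≥ c ∧ (k2 < c ∨ max f1 now ≤ max f2 now) ∧ (k3 < c ∨ max f1 now ≤ max f3 now)
    · rw [stepB_pick0 _ _ _ _ _ _ _ _ h0,
        stepA_pick0 _ _ _ _ _ _ _ _ (by omega) (by omega)]
      simp only [Option.map_some, gBA, Option.some.injEq, Prod.mk.injEq, true_and]
      omega
    · by_cases h1 : k2 ≥ c ∧ (k3 < c ∨ max f2 now ≤ max f3 now)
      · rw [stepB_pick1 _ _ _ _ _ _ _ _ h0 h1,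
          stepA_pick1 _ _ _ _ _ _ _ _ (by omega) (by omega) (by omega)]
        simp only [Option.map_some, gBA, Option.some.injEq, Prod.mk.injEq, true_and]
        omega
      · by_cases h2 : k3 ≥ c
        · rw [stepB_pick2 _ _ _ _ _ _ _ _ h0 h1 h2,
            stepA_pick2 _ _ _ _ _ _ _ _ (by omega) (by omega) (by omega) (by omega)]
          simp only [Option.map_some, gBA, Option.some.injEq, Prod.mk.injEq, true_and]
          omega
        · rw [stepB_none _ _ _ _ _ _ _ _ (by omega),
            stepA_none _ _ _ _ _ _ _ _ (by omega)]
          rfl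

lemma fold_eq (A : List Int) (hA : ∀ c ∈ A, 0 ≤ c)
    (s : Option (Int×Int×Int×Int×Int×Int×Int)) :
    A.foldl stepA (Option.map gBA s) = Option.map gBA (A.foldl stepB s) := by
  induction A generalizing s with
  | nil => rfl
  | cons c A ih =>
    simp only [List.foldl_cons]
    rw [step_eq c (hA c List.mem_cons_self) s]
    exact ih (fun x hx => hA x (List.mem_cons_of_mem _ hx)) (stepB s c)

-- ===== VERDICT (by name: the statement is the Claim_ definition above) =====
theorem MaxWaitingTime_spec : Claim_equal_MaxWaitingTime := by
  intro A X Y Z _hDom hPre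
  unfold Spec_MaxWaitingTime MaxWaitingTime MaxWaitingTime_alt
  have key : A.foldl stepA (some (X, Y, Z, 0, 0, 0, 0))
      = Option.map gBA (A.foldl stepB (some (X, Y, Z, 0, 0, 0, 0))) := by
    conv_lhs => rw [show (some (X, Y, Z, (0:Int), 0, 0, (0:Int)))
      = Option.map gBA (some (X, Y, Z, (0:Int), 0, 0, 0)) from by simp [gBA]]
    exact fold_eq A hPre _
  rw [key]
  cases hfb : A.foldl stepB (some (X, Y, Z, 0, 0, 0, 0)) with
  | none => rfl
  | some s =>
    obtain ⟨k1, k2, k3, f1, f2, f3, now⟩ := s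
    simp [gBA]
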